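-- pv_equiv track=rewrite | github.com/strk2333/LeetCodeTrials | code2017/kyu.py | pack_route_data
-- ===== SOURCE A (Python) =====
-- def pack_route_data(spot_count, route_list):
--     speed_list = []
--     for i in range(spot_count - 1):
--         speed_list.append([])
--         for j in route_list:
--             if j[0] == i + 1 and j[1] == i + 2:
--                 speed_list[i].append(j[2])
--
--     return speed_list
-- ===== SOURCE B (Python) =====
-- def pack_route_data(spot_count, route_list):
--     n = spot_count - 1
--     speed_list = [[] for _ in range(n)]
--     for j in route_list:
--         s = j[0]
--         if 1 <= s <= n and j[1] == s + 1:
--             speed_list[s - 1].append(j[2])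
--     return speed_list
-- ===== Notes on version B (the rewrite author's own statement) =====
-- stated objective: faster
-- what changed: Replaces A's nested gather (rescanning the whole route list once per spot pair) with preallocated buckets and a single scatter pass that drops each route directly into its bucket.
import Mathlib
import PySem

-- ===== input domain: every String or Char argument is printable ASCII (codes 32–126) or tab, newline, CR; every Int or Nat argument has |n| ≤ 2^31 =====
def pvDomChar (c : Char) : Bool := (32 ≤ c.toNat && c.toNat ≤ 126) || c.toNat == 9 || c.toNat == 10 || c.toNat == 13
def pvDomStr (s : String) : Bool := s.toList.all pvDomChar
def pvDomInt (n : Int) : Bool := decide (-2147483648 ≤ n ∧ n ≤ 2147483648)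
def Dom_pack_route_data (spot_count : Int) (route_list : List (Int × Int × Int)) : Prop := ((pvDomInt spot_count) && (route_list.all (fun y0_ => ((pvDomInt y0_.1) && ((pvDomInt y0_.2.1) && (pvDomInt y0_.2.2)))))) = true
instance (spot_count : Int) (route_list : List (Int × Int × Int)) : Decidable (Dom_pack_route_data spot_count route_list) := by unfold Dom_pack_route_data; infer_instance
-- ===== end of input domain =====

-- B replaces A's nested gather (one rescan of route_list per spot pair) with preallocated
-- buckets and a single scatter pass over route_list; the return values are identical.


-- ===== PORT A =====
-- A: for i in range(spot_count - 1): append a fresh bucket, then scan all routes and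
-- append j[2] into bucket i whenever j[0] == i+1 and j[1] == i+2.
def pack_route_data (spot_count : Int) (route_list : List (Int × Int × Int)) : List (List Int) :=
  (PySem.List.pyRange 0 (spot_count - 1) 1).foldl
    (fun speed_list i =>
      speed_list ++
        [route_list.foldl
          (fun bucket j =>
            if j.1 = i + 1 ∧ j.2.1 = i + 2 then bucket ++ [j.2.2] else bucket)
          []])
    []

-- ===== PORT B =====
-- speed_list[s-1].append(j[2]) on an in-range index (out-of-range never occurs in B)
def pvBucketAppend (l : List (List Int)) (p : Nat) (v : Int) : List (List Int) :=
  match l, p with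
  | [], _ => []
  | x :: xs, 0 => (x ++ [v]) :: xs
  | x :: xs, p + 1 => x :: pvBucketAppend xs p v

-- B: preallocate spot_count - 1 empty buckets, then one scatter pass over route_list.
def pack_route_data_alt (spot_count : Int) (route_list : List (Int × Int × Int)) : List (List Int) :=
  let n := spot_count - 1
  route_list.foldl
    (fun speed_list j =>
      if 1 ≤ j.1 ∧ j.1 ≤ n ∧ j.2.1 = j.1 + 1 then
        pvBucketAppend speed_list (j.1 - 1).toNat j.2.2
      else speed_list)
    ((List.range n.toNat).map (fun _ => ([] : List Int)))

-- ===== PRECONDITION & SPEC =====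
def Spec_pack_route_data (spot_count : Int) (route_list : List (Int × Int × Int)) (out : List (List Int)) : Prop := out = pack_route_data_alt spot_count route_list
instance (spot_count : Int) (route_list : List (Int × Int × Int)) (out : List (List Int)) : Decidable (Spec_pack_route_data spot_count route_list out) := by unfold Spec_pack_route_data; infer_instance

-- ===== CLAIM (what is proved, stated in full; the proofs are below) =====
def Claim_equal_pack_route_data : Prop := ∀ (spot_count : Int) (route_list : List (Int × Int × Int)), Dom_pack_route_data spot_count route_list → Spec_pack_route_data spot_count route_list (pack_route_data spot_count route_list)

-- ===== LEMMAS AND PROOFS =====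

-- the bucket for gap i: speeds of routes going from spot i+1 to spot i+2, in list order
def pvGather (route_list : List (Int × Int × Int)) (i : Int) : List Int :=
  (route_list.filter (fun j => decide (j.1 = i + 1 ∧ j.2.1 = i + 2))).map (·.2.2)

theorem pvGather_nil (i : Int) : pvGather [] i = [] := rfl

theorem pvGather_cons (j : Int × Int × Int) (rs : List (Int × Int × Int)) (i : Int) :
    pvGather (j :: rs) i =
      (if j.1 = i + 1 ∧ j.2.1 = i + 2 then [j.2.2] else []) ++ pvGather rs i := by
  by_cases h : j.1 = i + 1 ∧ j.2.1 = i + 2 <;>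
    simp [pvGather, h]

theorem pvBucketAppend_length (l : List (List Int)) (p : Nat) (v : Int) :
    (pvBucketAppend l p v).length = l.length := by
  induction l generalizing p with
  | nil => rfl
  | cons x xs ih => cases p <;> simp [pvBucketAppend, ih]

theorem pvBucketAppend_getElem (l : List (List Int)) (p : Nat) (v : Int) (k : Nat)
    (hk : k < l.length) :
    (pvBucketAppend l p v)[k]'(by rw [pvBucketAppend_length]; exact hk) =
      if k = p then l[k] ++ [v] else l[k] := by
  induction l generalizing p k with
  | nil => simp at hk
  | cons x xs ih =>
    cases p with
    | zero =>
      cases k with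
      | zero => simp [pvBucketAppend]
      | succ k => simp [pvBucketAppend]
    | succ p =>
      cases k with
      | zero => simp [pvBucketAppend]
      | succ k => simpa [pvBucketAppend, Nat.succ_eq_add_one] using ih p k (by simpa using hk)

theorem pvBucketAppend_map_range (n : Nat) (g : Nat → List Int) (p : Nat) (v : Int) :
    pvBucketAppend ((List.range n).map g) p v =
      (List.range n).map (fun k => if k = p then g k ++ [v] else g k) := by
  apply List.ext_getElem
  · simp [pvBucketAppend_length]
  · intro k h1 h2
    have hk : k < n := by simpa [pvBucketAppend_length] using h1
    rw [pvBucketAppend_getElem]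
    · simp [hk]
    · simpa using hk

-- the scatter loop invariant: starting from buckets (range n).map g, folding rs appends
-- exactly pvGather rs k to bucket k
theorem pvScatter_invariant (rs : List (Int × Int × Int)) (n : Int) (g : Nat → List Int) :
    rs.foldl
      (fun speed_list j =>
        if 1 ≤ j.1 ∧ j.1 ≤ n ∧ j.2.1 = j.1 + 1 then
          pvBucketAppend speed_list (j.1 - 1).toNat j.2.2
        else speed_list)
      ((List.range n.toNat).map g)
    = (List.range n.toNat).map (fun k => g k ++ pvGather rs (k : Int)) := by
  induction rs generalizing g with
  | nil => simp [pvGather_nil]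
  | cons j rs ih =>
    simp only [List.foldl_cons]
    split_ifs with hc
    · obtain ⟨h1, h2, h3⟩ := hc
      rw [pvBucketAppend_map_range, ih]
      apply List.map_congr_left
      intro k hk
      have hkn : (k : Int) < n.toNat := by exact_mod_cast List.mem_range.mp hk
      rw [pvGather_cons]
      by_cases hkp : k = (j.1 - 1).toNat
      · have hkj : (k : Int) = j.1 - 1 := by
          rw [hkp]; omega
        have : j.1 = (k : Int) + 1 ∧ j.2.1 = (k : Int) + 2 := by
          constructor <;> omega
        rw [if_pos hkp, if_pos this, List.append_assoc]
      · have hkj : ¬ (j.1 = (k : Int) + 1 ∧ j.2.1 = (k : Int) + 2) := by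
          rintro ⟨e1, _⟩
          exact hkp (by omega)
        rw [if_neg hkp, if_neg hkj, List.nil_append]
    · rw [ih]
      apply List.map_congr_left
      intro k hk
      have hkn : (k : Int) < n.toNat := by exact_mod_cast List.mem_range.mp hk
      have hnk : ((n.toNat : Int)) ≤ n := by omega
      rw [pvGather_cons]
      have hkj : ¬ (j.1 = (k : Int) + 1 ∧ j.2.1 = (k : Int) + 2) := by
        rintro ⟨e1, e2⟩
        exact hc ⟨by omega, by omega, by omega⟩
      simp [hkj]

-- A's nested loops compute pvGather for each i in range(spot_count - 1)
theorem pvPortA_eq (spot_count : Int) (route_list : List (Int × Int × Int)) :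
    pack_route_data spot_count route_list =
      (List.range (spot_count - 1).toNat).map (fun (k : Nat) => pvGather route_list (k : Int)) := by
  unfold pack_route_data
  rw [PySem.List.foldl_append_singleton_eq_map, PySem.List.pyRange_one, List.map_map,
    List.nil_append, Int.sub_zero]
  apply List.map_congr_left
  intro k _
  simp only [Function.comp, zero_add]
  rw [PySem.List.foldl_append_ite]
  simp [pvGather]

-- ===== VERDICT (by name: the statement is the Claim_ definition above) =====
theorem pack_route_data_spec : Claim_equal_pack_route_data := by
  intro spot_count route_list _
  unfold Spec_pack_route_data
  rw [pvPortA_eq]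
  unfold pack_route_data_alt
  rw [pvScatter_invariant]
  apply List.map_congr_left
  intro k _
  rw [List.nil_append]
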